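-- pv_equiv track=rewrite | github.com/TCT-web3/demo | web-demo/src/utils.py | get_boogie_type
-- ===== SOURCE A (Python) =====
-- def get_boogie_type(t_type):
--     if not t_type.startswith("t_mapping"):
--         return t_type.replace("t_","")
--
--     ret_str = t_type[len("t_mapping("):]
--     comma_pos = ret_str.find(",")
--     first = ret_str[0:comma_pos]
--     first = "["+first.replace("t_","")+"]"
--     ret_str = ret_str[comma_pos+1:len(ret_str)-1]
--     return first + " " + get_boogie_type(ret_str)
-- ===== SOURCE B (Python) =====
-- def get_boogie_type(t_type):
--     keys = []
--     t = t_type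
--     while t.startswith("t_mapping"):
--         body = t[len("t_mapping("):]
--         c = body.find(",")
--         keys.append(body[:c])
--         t = body[c + 1:-1]
--     parts = ["[" + k.replace("t_", "") + "]" for k in keys] + [t.replace("t_", "")]
--     return " ".join(parts)
-- ===== Notes on version B (the rewrite author's own statement) =====
-- stated objective: alternative
-- what changed: Replaced A's build-the-string-as-you-recurse formulation by a two-phase pipeline: a while loop that only collects the raw mapping keys into a list, then one final space-join over the bracketed keys plus the translated leaf.
import Mathlib
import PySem

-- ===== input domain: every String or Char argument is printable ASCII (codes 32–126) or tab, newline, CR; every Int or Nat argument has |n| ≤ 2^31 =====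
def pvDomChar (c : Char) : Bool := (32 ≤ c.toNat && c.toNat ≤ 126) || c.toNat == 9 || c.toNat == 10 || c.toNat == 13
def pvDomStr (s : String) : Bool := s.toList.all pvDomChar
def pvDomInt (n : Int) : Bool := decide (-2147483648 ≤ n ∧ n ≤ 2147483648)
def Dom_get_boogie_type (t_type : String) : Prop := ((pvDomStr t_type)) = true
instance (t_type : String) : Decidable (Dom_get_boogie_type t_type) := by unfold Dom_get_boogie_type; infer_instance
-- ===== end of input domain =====

-- B replaces A's build-the-string-as-you-recurse formulation by two phases: a loop that
-- collects the raw mapping keys into a list, then one final join of bracketed keys + leaf.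

-- termination helper cited by both ports' decreasing_by
theorem pvRestLen (cs : List Char) (c : Int) (h : 9 ≤ cs.length) :
    (PySem.List.slice (PySem.List.slice cs (some 10) none) (some (c + 1))
       (some (((PySem.List.slice cs (some 10) none).length : Int) - 1))).length < cs.length := by
  have h1 : (PySem.List.slice cs (some 10) none).length = cs.length - 10 := by
    rw [PySem.List.slice_from cs (by norm_num)]; simp
  rw [PySem.List.length_slice]
  have h2 := PySem.List.clampIdx_le (PySem.List.slice cs (some 10) none).length
      (((PySem.List.slice cs (some 10) none).length : Int) - 1)
  omega

-- a stop of -1 is the same slice as a stop of len-1 (cited by B's decreasing_by and the proofs)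
-- the (-1)-stop form of pvRestLen, cited by B's decreasing_by
theorem pvRestLenNeg (cs : List Char) (c : Int) (h : 9 ≤ cs.length) :
    (PySem.List.slice (PySem.List.slice cs (some 10) none) (some (c + 1))
       (some (-1))).length < cs.length := by
  have h1 : (PySem.List.slice cs (some 10) none).length = cs.length - 10 := by
    rw [PySem.List.slice_from cs (by norm_num)]; simp
  rw [PySem.List.length_slice]
  have h2 := PySem.List.clampIdx_le (PySem.List.slice cs (some 10) none).length (-1)
  omega

-- ===== PORT A =====
-- A, step for step, on the code-point list (PySem.Chars/PySem.List = exact Python string ops)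
def getBoogieChars (cs : List Char) : List Char :=
  if PySem.Chars.startswith cs "t_mapping".toList = false then
    PySem.Chars.replace cs "t_".toList []
  else
    let ret := PySem.List.slice cs (some 10) none            -- t_type[len("t_mapping("):]
    let commaPos := PySem.Chars.find ret ",".toList          -- ret_str.find(",")
    let first := PySem.List.slice ret (some 0) (some commaPos)
    let frag := '[' :: (PySem.Chars.replace first "t_".toList []) ++ [']']
    let ret2 := PySem.List.slice ret (some (commaPos + 1)) (some ((ret.length : Int) - 1))
    frag ++ ' ' :: getBoogieChars ret2
termination_by cs.length
decreasing_by
  have hb : "t_mapping".toList <+: cs :=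
    (PySem.Chars.startswith_iff _ _).mp
      (by simpa using ‹¬ PySem.Chars.startswith cs "t_mapping".toList = false›)
  exact pvRestLen cs _ (by simpa using hb.length_le)

def get_boogie_type (t_type : String) : String :=
  String.ofList (getBoogieChars t_type.toList)

-- ===== PORT B =====
-- while loop: as long as t is a mapping, peel off one raw key into the accumulator
def collectKeys (keys : List (List Char)) (t : List Char) : List (List Char) × List Char :=
  if PySem.Chars.startswith t "t_mapping".toList = true then
    let body := PySem.List.slice t (some 10) none            -- t[len("t_mapping("):]
    let c := PySem.Chars.find body ",".toList
    collectKeys (keys ++ [PySem.List.slice body none (some c)])     -- keys.append(body[:c])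
      (PySem.List.slice body (some (c + 1)) (some (-1)))            -- t = body[c+1:-1]
  else (keys, t)
termination_by t.length
decreasing_by
  have hb : "t_mapping".toList <+: t := (PySem.Chars.startswith_iff _ _).mp ‹_›
  exact pvRestLenNeg t _ (by simpa using hb.length_le)

-- final render: bracket each key, append the leaf, join everything with single spaces
def renderParts (keys : List (List Char)) (leaf : List Char) : List Char :=
  PySem.Chars.join [' ']
    (keys.map (fun k => '[' :: (PySem.Chars.replace k "t_".toList []) ++ [']'])
      ++ [PySem.Chars.replace leaf "t_".toList []])

def get_boogie_type_alt (t_type : String) : String :=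
  String.ofList (renderParts (collectKeys [] t_type.toList).1 (collectKeys [] t_type.toList).2)

-- ===== PRECONDITION & SPEC =====
def Spec_get_boogie_type (t_type : String) (out : String) : Prop := out = get_boogie_type_alt t_type
instance (t_type : String) (out : String) : Decidable (Spec_get_boogie_type t_type out) := by unfold Spec_get_boogie_type; infer_instance

-- ===== CLAIM (what is proved, stated in full; the proofs are below) =====
def Claim_equal_get_boogie_type : Prop := ∀ (t_type : String), Dom_get_boogie_type t_type → Spec_get_boogie_type t_type (get_boogie_type t_type)

-- ===== LEMMAS AND PROOFS =====

-- a stop of -1 is the same slice as a stop of len-1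
theorem pvClampNegOne (n : Nat) :
    PySem.List.clampIdx n (-1) = PySem.List.clampIdx n ((n : Int) - 1) := by
  unfold PySem.List.clampIdx
  split_ifs <;> omega

theorem pvSliceNegOne (cs : List Char) (a? : Option Int) :
    PySem.List.slice cs a? (some (-1)) = PySem.List.slice cs a? (some ((cs.length : Int) - 1)) := by
  simp only [PySem.List.slice, pvClampNegOne]

theorem slice_none_zero (cs : List Char) (c : Int) :
    PySem.List.slice cs none (some c) = PySem.List.slice cs (some 0) (some c) := by
  simp [PySem.List.slice, PySem.List.clampIdx]

-- join ' ' merges a trailing pair into one space-separated part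
theorem join_merge_last (xs : List (List Char)) (a b : List Char) :
    PySem.Chars.join [' '] (xs ++ [a, b]) = PySem.Chars.join [' '] (xs ++ [a ++ ' ' :: b]) := by
  induction xs with
  | nil => simp [PySem.Chars.join_cons_cons, PySem.Chars.join_singleton]
  | cons x rest ih =>
    cases rest with
    | nil => simp [PySem.Chars.join_cons_cons, PySem.Chars.join_singleton]
    | cons y r =>
      simp only [List.cons_append, PySem.Chars.join_cons_cons] at *
      simp [ih]

theorem collect_render_eq (t : List Char) : ∀ keys,
    renderParts (collectKeys keys t).1 (collectKeys keys t).2 =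
      PySem.Chars.join [' ']
        ((keys.map (fun k => '[' :: (PySem.Chars.replace k "t_".toList []) ++ [']']))
          ++ [getBoogieChars t]) := by
  induction t using getBoogieChars.induct with
  | case1 cs h =>
    intro keys
    rw [collectKeys, if_neg (by rw [h]; simp), getBoogieChars, if_pos h]
    rfl
  | case2 cs h ret commaPos ret2 ih =>
    intro keys
    have hsw : PySem.Chars.startswith cs "t_mapping".toList = true := by simpa using h
    rw [collectKeys, if_pos hsw]
    simp only
    have hrest : PySem.List.slice (PySem.List.slice cs (some 10) none)
        (some (PySem.Chars.find (PySem.List.slice cs (some 10) none) ",".toList + 1))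
        (some (-1)) = ret2 := by
      simp only [ret2, commaPos, ret]; rw [pvSliceNegOne]
    rw [hrest, ih]
    conv_rhs => rw [getBoogieChars, if_neg h]
    rw [slice_none_zero]
    have := join_merge_last (keys.map (fun k => '[' :: (PySem.Chars.replace k "t_".toList []) ++ [']']))
      ('[' :: (PySem.Chars.replace (PySem.List.slice ret (some 0) (some commaPos)) "t_".toList []) ++ [']'])
      (getBoogieChars ret2)
    simp only [List.map_append, List.map_cons, List.map_nil, List.append_assoc,
      List.cons_append, List.nil_append] at this ⊢
    rw [this]

-- ===== VERDICT (by name: the statement is the Claim_ definition above) =====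
theorem get_boogie_type_spec : Claim_equal_get_boogie_type := by
  intro t _
  unfold Spec_get_boogie_type get_boogie_type get_boogie_type_alt
  rw [collect_render_eq t.toList []]
  simp [PySem.Chars.join_singleton]
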